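-- pv_equiv track=rewrite | github.com/infinite-Joy/programming-languages | python-projects/algo_and_ds/encrypted_words.py | findEncryptedWord
-- ===== SOURCE A (Python) =====
-- def findEncryptedWord(s):
--     # Write your code here
--     if len(s) in (1, 0):
--         return s
--     mid = int(len(s) / 2)
--     if len(s) % 2 == 0:
--         mid = mid - 1
--     out = s[mid] # a
--     first = findEncryptedWord(s[:mid])
--     second = findEncryptedWord(s[mid+1:])
--     return out + first + second
-- ===== SOURCE B (Python) =====
-- def findEncryptedWord(s):
--     # iterative: explicit stack of pending pieces, midpoint-first preorder
--     stack = [s]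
--     result = []
--     while stack:
--         piece = stack.pop()
--         n = len(piece)
--         if n == 0:
--             continue
--         mid = (n - 1) // 2
--         result.append(piece[mid])
--         stack.append(piece[mid + 1:])  # right sub-piece, processed after
--         stack.append(piece[:mid])      # left sub-piece, on top (processed first)
--     return ''.join(result)
-- ===== Notes on version B (the rewrite author's own statement) =====
-- stated objective: alternative
-- what changed: Replaces A's recursion (with per-call slicing and string concatenation of the three parts) by an iterative explicit-stack loop that pops pieces, appends the midpoint character to one result list, pushes the two sub-pieces, and joins once at the end; the midpoint is computed by the single formula (n-1)//2 instead of A's parity branch.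
import Mathlib
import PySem

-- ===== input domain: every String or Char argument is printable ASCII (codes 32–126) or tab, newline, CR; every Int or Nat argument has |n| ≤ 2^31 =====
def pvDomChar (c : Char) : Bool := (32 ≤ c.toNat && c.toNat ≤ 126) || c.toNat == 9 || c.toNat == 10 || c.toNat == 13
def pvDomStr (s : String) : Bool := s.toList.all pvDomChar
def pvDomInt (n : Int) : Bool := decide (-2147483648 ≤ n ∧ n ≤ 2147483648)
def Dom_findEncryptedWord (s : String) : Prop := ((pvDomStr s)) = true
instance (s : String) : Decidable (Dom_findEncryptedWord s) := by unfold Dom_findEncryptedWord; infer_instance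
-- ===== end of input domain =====

-- B replaces A's recursion by an explicit-stack iteration; same return value, no side effects.

-- ===== PORT A =====
-- A's recursion over the character list; the Nat fuel is only a totality guard (fuel = length
-- suffices, each recursive call strictly shrinks the piece); slices s[:mid] / s[mid+1:] are
-- PySem.List.slice (exact).
def findEncryptedWordRec : Nat → List Char → List Char
  | 0, l => l   -- unreachable with adequate fuel
  | fuel + 1, l =>
    if l.length = 1 ∨ l.length = 0 then l
    else
      -- mid = int(len(s)/2); if len(s) even, mid -= 1  (len(s)/2 is exact float division
      -- here); mid is written inline below; out = s[mid] via pyGet? (unreachable none: 0 ≤ mid < len)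
      (match PySem.List.pyGet? l ((if l.length % 2 = 0 then l.length / 2 - 1 else l.length / 2 : Nat) : Int) with
        | some c => [c]
        | none => [])
      ++ findEncryptedWordRec fuel (PySem.List.slice l none (some ((if l.length % 2 = 0 then l.length / 2 - 1 else l.length / 2 : Nat) : Int)))
      ++ findEncryptedWordRec fuel (PySem.List.slice l (some (((if l.length % 2 = 0 then l.length / 2 - 1 else l.length / 2) + 1 : Nat) : Int)) none)

def findEncryptedWord (s : String) : String :=
  String.ofList (findEncryptedWordRec s.toList.length s.toList)

-- ===== PORT B =====
-- B's while-loop: an explicit stack of pending pieces (head = top of Python's list-stack) and a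
-- result accumulator; the Nat fuel is only a totality guard (the stack measure Σ(2·len+1) strictly
-- decreases each iteration, so fuel = 2·len(s)+1 suffices).
def findEncryptedWordLoop : Nat → List (List Char) → List Char → List Char
  | 0, _, result => result   -- unreachable with adequate fuel
  | _ + 1, [], result => result
  | fuel + 1, p :: rest, result =>
    if p.length = 0 then findEncryptedWordLoop fuel rest result
    else
      -- mid = (n - 1) // 2, written inline; piece[mid] via pyGet? (unreachable none: 0 ≤ mid < n)
      findEncryptedWordLoop fuel
        (PySem.List.slice p none (some (((p.length - 1) / 2 : Nat) : Int))
          :: PySem.List.slice p (some (((p.length - 1) / 2 + 1 : Nat) : Int)) none :: rest)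
        (result ++ match PySem.List.pyGet? p (((p.length - 1) / 2 : Nat) : Int) with
          | some c => [c]
          | none => [])

def findEncryptedWord_alt (s : String) : String :=
  String.ofList (findEncryptedWordLoop (2 * s.toList.length + 1) [s.toList] [])

-- ===== PRECONDITION & SPEC =====
def Spec_findEncryptedWord (s : String) (out : String) : Prop := out = findEncryptedWord_alt s
instance (s : String) (out : String) : Decidable (Spec_findEncryptedWord s out) := by unfold Spec_findEncryptedWord; infer_instance

-- ===== CLAIM (what is proved, stated in full; the proofs are below) =====
def Claim_equal_findEncryptedWord : Prop := ∀ (s : String), Dom_findEncryptedWord s → Spec_findEncryptedWord s (findEncryptedWord s)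

-- ===== LEMMAS AND PROOFS =====

theorem findEncryptedWordRec_nil (fuel : Nat) : findEncryptedWordRec fuel [] = [] := by
  cases fuel <;> simp [findEncryptedWordRec]

-- the fuel is irrelevant once it covers the piece's length
theorem findEncryptedWordRec_fuel (f1 : Nat) : ∀ (f2 : Nat) (l : List Char),
    l.length ≤ f1 → l.length ≤ f2 →
    findEncryptedWordRec f1 l = findEncryptedWordRec f2 l := by
  induction f1 with
  | zero =>
    intro f2 l h1 _
    have : l = [] := List.length_eq_zero_iff.mp (by omega)
    subst this
    simp [findEncryptedWordRec_nil]
  | succ f1 ih =>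
    intro f2 l h1 h2
    cases f2 with
    | zero =>
      have : l = [] := List.length_eq_zero_iff.mp (by omega)
      subst this
      simp [findEncryptedWordRec_nil]
    | succ f2 =>
      rw [findEncryptedWordRec, findEncryptedWordRec]
      by_cases hb : l.length = 1 ∨ l.length = 0
      · rw [if_pos hb, if_pos hb]
      · rw [if_neg hb, if_neg hb]
        have hmid : (if l.length % 2 = 0 then l.length / 2 - 1 else l.length / 2) + 1 ≤ l.length := by
          split <;> omega
        rw [ih f2 _ (by rw [PySem.List.slice_to_natCast]; simp only [List.length_take]; omega)
              (by rw [PySem.List.slice_to_natCast]; simp only [List.length_take]; omega),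
            ih f2 _ (by rw [PySem.List.slice_from_natCast]; simp only [List.length_drop]; omega)
              (by rw [PySem.List.slice_from_natCast]; simp only [List.length_drop]; omega)]

-- A's recursion on a nonempty piece, with exact fuel and B's midpoint formula (n-1)/2
theorem findEncryptedWordRec_nonempty (p : List Char) (h : 1 ≤ p.length) :
    findEncryptedWordRec p.length p =
      (match PySem.List.pyGet? p ((((p.length - 1) / 2 : Nat)) : Int) with
        | some c => [c]
        | none => [])
      ++ findEncryptedWordRec (PySem.List.slice p none (some (((p.length - 1) / 2 : Nat) : Int))).length
           (PySem.List.slice p none (some (((p.length - 1) / 2 : Nat) : Int)))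
      ++ findEncryptedWordRec (PySem.List.slice p (some (((p.length - 1) / 2 + 1 : Nat) : Int)) none).length
           (PySem.List.slice p (some (((p.length - 1) / 2 + 1 : Nat) : Int)) none) := by
  obtain ⟨n, hn⟩ : ∃ n, p.length = n + 1 := ⟨p.length - 1, by omega⟩
  rw [hn, findEncryptedWordRec]
  rcases Nat.lt_or_ge p.length 2 with h2 | h2
  · -- length = 1 : A returns p itself; the right-hand side also evaluates to p
    have hl : p.length = 1 := by omega
    have hn0 : n = 0 := by omega
    subst hn0
    obtain ⟨c, rfl⟩ := List.length_eq_one_iff.mp hl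
    norm_num [PySem.List.slice, PySem.List.clampIdx, PySem.List.pyGet?_zero_cons,
      findEncryptedWordRec_nil]
  · -- length ≥ 2 : A's branch is taken; rewrite its parity-split midpoint to (n-1)/2
    have hne : ¬ (p.length = 1 ∨ p.length = 0) := by omega
    rw [← hn, if_neg hne]
    have hmid : (if p.length % 2 = 0 then p.length / 2 - 1 else p.length / 2)
        = (p.length - 1) / 2 := by split_ifs <;> omega
    simp only [hmid]
    have hm1 : (PySem.List.slice p none (some (((p.length - 1) / 2 : Nat) : Int))).length ≤ n := by
      rw [PySem.List.slice_to_natCast]; simp only [List.length_take]; omega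
    have hm2 : (PySem.List.slice p (some (((p.length - 1) / 2 + 1 : Nat) : Int)) none).length ≤ n := by
      rw [PySem.List.slice_from_natCast]; simp only [List.length_drop]; omega
    rw [findEncryptedWordRec_fuel n _ _ hm1 (le_refl _),
        findEncryptedWordRec_fuel n _ _ hm2 (le_refl _)]

-- loop invariant: with adequate fuel the stack loop emits acc ++ the A-results of the pieces, top first
theorem findEncryptedWordLoop_eq (fuel : Nat) : ∀ (st : List (List Char)) (acc : List Char),
    (st.map (fun p => 2 * p.length + 1)).sum ≤ fuel →
    findEncryptedWordLoop fuel st acc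
      = acc ++ (st.map (fun p => findEncryptedWordRec p.length p)).flatten := by
  induction fuel with
  | zero =>
    intro st acc hsum
    cases st with
    | nil => simp [findEncryptedWordLoop]
    | cons p rest => simp at hsum
  | succ fuel ih =>
    intro st acc hsum
    cases st with
    | nil => simp [findEncryptedWordLoop]
    | cons p rest =>
      simp only [List.map_cons, List.sum_cons] at hsum
      rw [findEncryptedWordLoop]
      by_cases hp : p.length = 0
      · rw [if_pos hp]
        have hnil : p = [] := List.length_eq_zero_iff.mp hp
        rw [ih rest acc (by omega)]
        simp [hnil, findEncryptedWordRec_nil]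
      · rw [if_neg hp]
        rw [ih _ _ (by
          rw [List.map_cons, List.map_cons, List.sum_cons, List.sum_cons,
            PySem.List.slice_to_natCast, PySem.List.slice_from_natCast]
          simp only [List.length_take, List.length_drop]
          omega)]
        conv_rhs => rw [List.map_cons, List.flatten_cons,
          findEncryptedWordRec_nonempty p (by omega)]
        simp only [List.map_cons, List.flatten_cons, List.append_assoc]

-- ===== VERDICT (by name: the statement is the Claim_ definition above) =====
theorem findEncryptedWord_spec : Claim_equal_findEncryptedWord := by
  intro s _
  unfold Spec_findEncryptedWord findEncryptedWord findEncryptedWord_alt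
  rw [findEncryptedWordLoop_eq (2 * s.toList.length + 1) [s.toList] [] (by simp)]
  simp only [List.map_cons, List.map_nil, List.flatten_cons, List.flatten_nil,
    List.nil_append, List.append_nil]
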